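-- pv_equiv track=rewrite | github.com/christiangraham702/scrapeops | server_scraper/server_scraper/funcs.py | get_base_url
-- ===== SOURCE A (Python) =====
-- def get_base_url(url):
--     key = '/'
--     l = 0
--     base_url = ''
--     for c in url:
--         if c == key:
--             l += 1
--             if l == 3:
--                 break
--         base_url += c
--     return base_url
-- ===== SOURCE B (Python) =====
-- def get_base_url(url):
--     return '/'.join(url.split('/')[:3])
-- ===== Notes on version B (the rewrite author's own statement) =====
-- stated objective: idiomatic
-- what changed: Replaces the explicit character scan with a slash counter and break by splitting the URL on the slash separator and rejoining the first three segments.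
import Mathlib
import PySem

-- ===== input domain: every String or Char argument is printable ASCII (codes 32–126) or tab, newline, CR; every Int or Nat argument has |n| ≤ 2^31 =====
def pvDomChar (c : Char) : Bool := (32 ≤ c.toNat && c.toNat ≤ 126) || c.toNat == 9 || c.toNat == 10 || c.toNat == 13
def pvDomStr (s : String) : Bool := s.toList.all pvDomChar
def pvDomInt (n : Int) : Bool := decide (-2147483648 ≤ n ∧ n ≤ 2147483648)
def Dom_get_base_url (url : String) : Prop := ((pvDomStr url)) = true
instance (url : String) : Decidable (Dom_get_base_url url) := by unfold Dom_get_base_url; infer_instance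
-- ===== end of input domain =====

-- B replaces A's character scan with a slash counter and break by split('/')[:3] rejoined with '/'; same value, more idiomatic.


-- ===== PORT A =====
-- A's loop: counter l of '/' seen, accumulate base_url char by char, break at the third '/'.
def pvGoA (l : Nat) (acc : List Char) : List Char → List Char
  | [] => acc
  | c :: rest =>
    if c = '/' then
      if l + 1 = 3 then acc
      else pvGoA (l + 1) (acc ++ [c]) rest
    else pvGoA l (acc ++ [c]) rest

def get_base_url (url : String) : String := String.mk (pvGoA 0 [] url.toList)

-- ===== PORT B =====
-- '/'.join(url.split('/')[:3]) — split/slice/join via PySem (split exact for a nonempty separator).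
def get_base_url_alt (url : String) : String :=
  String.mk (PySem.Chars.join ['/']
    (PySem.List.slice (PySem.Chars.splitOn url.toList ['/']) none (some 3)))

-- ===== PRECONDITION & SPEC =====
def Spec_get_base_url (url : String) (out : String) : Prop := out = get_base_url_alt url
instance (url : String) (out : String) : Decidable (Spec_get_base_url url out) := by unfold Spec_get_base_url; infer_instance

-- ===== CLAIM (what is proved, stated in full; the proofs are below) =====
def Claim_equal_get_base_url : Prop := ∀ (url : String), Dom_get_base_url url → Spec_get_base_url url (get_base_url url)

-- ===== LEMMAS AND PROOFS =====

-- split on a single '/' as a plain structural recursion (proof-side characterisation of splitOn)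
def pvSplit1 : List Char → List (List Char)
  | [] => [[]]
  | c :: rest => if c = '/' then [] :: pvSplit1 rest else (pvSplit1 rest).modifyHead (c :: ·)

theorem pvSplit1_ne_nil (cs : List Char) : pvSplit1 cs ≠ [] := by
  cases cs with
  | nil => simp [pvSplit1]
  | cons c rest =>
    simp only [pvSplit1]
    split
    · simp
    · cases h : pvSplit1 rest with
      | nil => exact absurd h (pvSplit1_ne_nil rest)
      | cons p ps => simp

theorem pvGo_eq : ∀ (fuel : Nat) (l cur : List Char) (acc : List (List Char)),
    l.length ≤ fuel →
    PySem.Chars.splitOn.go ['/'] fuel l cur acc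
      = acc.reverse ++ (pvSplit1 l).modifyHead (cur.reverse ++ ·) := by
  intro fuel
  induction fuel with
  | zero =>
    intro l cur acc h
    have : l = [] := List.length_eq_zero_iff.mp (Nat.le_zero.mp h)
    subst this
    simp [PySem.Chars.splitOn.go, pvSplit1]
  | succ fuel ih =>
    intro l cur acc h
    cases l with
    | nil => simp [PySem.Chars.splitOn.go, pvSplit1]
    | cons c rest =>
      simp only [PySem.Chars.splitOn.go]
      by_cases hc : c = '/'
      · subst hc
        simp only [List.isPrefixOf, beq_self_eq_true, Bool.and_true,
          if_true, List.length_singleton, List.drop_one, List.tail_cons]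
        rw [ih rest [] (cur.reverse :: acc) (by simpa using h)]
        simp [pvSplit1]
        cases pvSplit1 rest <;> simp
      · have hpre : List.isPrefixOf ['/'] (c :: rest) = false := by
          simp [List.isPrefixOf]
          exact fun h' => hc h'.symm
        rw [hpre]
        simp only [Bool.false_eq_true, if_false]
        rw [ih rest (c :: cur) acc (by simpa using h)]
        simp only [pvSplit1, if_neg hc]
        cases hs : pvSplit1 rest with
        | nil => exact absurd hs (pvSplit1_ne_nil rest)
        | cons p ps => simp

theorem pvSplitOn_eq (cs : List Char) : PySem.Chars.splitOn cs ['/'] = pvSplit1 cs := by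
  rw [PySem.Chars.splitOn, pvGo_eq (cs.length + 1) cs [] [] (by omega)]
  cases h : pvSplit1 cs with
  | nil => exact absurd h (pvSplit1_ne_nil cs)
  | cons p ps => simp

theorem pvJoin_modifyHead (c : Char) (xs : List (List Char)) (h : xs ≠ []) :
    PySem.Chars.join ['/'] (xs.modifyHead (c :: ·)) = c :: PySem.Chars.join ['/'] xs := by
  cases xs with
  | nil => exact absurd rfl h
  | cons p ps =>
    cases ps with
    | nil => simp [PySem.Chars.join_singleton]
    | cons q qs => simp [PySem.Chars.join_cons_cons]

theorem pvTake_modifyHead {α : Type} (f : α → α) (n : Nat) (xs : List α) (h : 1 ≤ n) :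
    (xs.modifyHead f).take n = (xs.take n).modifyHead f := by
  cases xs with
  | nil => simp
  | cons x rest =>
    cases n with
    | zero => omega
    | succ m => simp

theorem pvGoA_join : ∀ (cs acc : List Char) (l : Nat), l < 3 →
    pvGoA l acc cs = acc ++ PySem.Chars.join ['/'] ((pvSplit1 cs).take (3 - l)) := by
  intro cs
  induction cs with
  | nil =>
    intro acc l hl
    have h : (1:Nat) ≤ 3 - l := by omega
    simp [pvGoA, pvSplit1, List.take_of_length_le, h, PySem.Chars.join_singleton]
  | cons c rest ih =>
    intro acc l hl
    by_cases hc : c = '/'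
    · subst hc
      by_cases h3 : l + 1 = 3
      · have h1 : 3 - l = 1 := by omega
        simp [pvGoA, h3, pvSplit1, h1, PySem.Chars.join_singleton]
      · have hstep : 3 - l = (3 - (l + 1)) + 1 := by omega
        simp only [pvGoA, h3, if_false, if_true]
        rw [ih (acc ++ ['/']) (l + 1) (by omega)]
        simp only [pvSplit1, reduceIte, hstep, List.take_succ_cons]
        cases ht : (pvSplit1 rest).take (3 - (l + 1)) with
        | nil =>
          have hn : pvSplit1 rest ≠ [] := pvSplit1_ne_nil rest
          have : 3 - (l + 1) = 0 := by
            cases hs : pvSplit1 rest with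
            | nil => exact absurd hs hn
            | cons p ps =>
              rw [hs] at ht
              cases n : 3 - (l + 1) with
              | zero => rfl
              | succ m => rw [n] at ht; simp at ht
          omega
        | cons p ps =>
          rw [PySem.Chars.join_cons_cons]
          simp
    · simp only [pvGoA, if_neg hc]
      rw [ih (acc ++ [c]) l hl]
      simp only [pvSplit1, if_neg hc]
      rw [pvTake_modifyHead _ _ _ (by omega)]
      rw [pvJoin_modifyHead c _ (by
        intro h0
        have hlen := congrArg List.length h0
        rw [List.length_take] at hlen
        simp only [List.length_nil] at hlen
        have hn : pvSplit1 rest ≠ [] := pvSplit1_ne_nil rest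
        have : 0 < (pvSplit1 rest).length := List.length_pos_iff.mpr hn
        omega)]
      simp

-- ===== VERDICT (by name: the statement is the Claim_ definition above) =====
theorem get_base_url_spec : Claim_equal_get_base_url := by
  intro url _
  unfold Spec_get_base_url get_base_url get_base_url_alt
  rw [PySem.List.slice_to _ (b := 3) (by norm_num), pvSplitOn_eq]
  rw [pvGoA_join url.toList [] 0 (by omega)]
  simp
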